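/- GENERATED by farm/mkstatement.py from design/units.tsv (unit `DGifGetImageHeader.3`) and the assertions of Gif/Spec/Seg_DGifGetImageHeader.lean — do not edit.
   THE STATEMENT of the proof unit `DGifGetImageHeader.3`: segment 3 of `DGifGetImageHeader` (36 instructions; entries 0x108ef8;
   exits 0x108f4e,0x108ffe,0x108e78; ranges 0x108ef8-0x108f4e,0x108fcb-0x108ffe,0x1090ce-0x1090e3)
   takes each of its entry assertions to one of its exit assertions (`Gif.Spec.DGifGetImageHeader.Seg3`), given the contracts of its callees.
   What the names mean: ProgX/Base/Spec/Basic.lean (the shared hypotheses), Gif/Spec/Seg_DGifGetImageHeader.lean (the assertions). The theorem to prove: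
   `theorem DGifGetImageHeader_3_ok : Gif.Spec.DGifGetImageHeader_3.Statement`. -/
import Gif.Code
import Gif.Dec.All
import Gif.Labels
import Gif.Spec.Alloc
import Gif.Spec.Seg_DGifGetImageHeader
namespace Gif.Spec.DGifGetImageHeader_3
open X86 X86.User Asan

/-- The statement of unit `DGifGetImageHeader.3`. -/
def Statement : Prop :=
  ∀ (Lay : Layout) (_hLay : Lay.hi = 0x1000000) (μ : Microarch) (_hμ : UserX.MicroOK μ) (u₀ : State)
    (_hcode : HasCodeNat Lay u₀ Gif.L.DGifGetImageHeader.entry Gif.Code.code_DGifGetImageHeader.nat Gif.L.DGifGetImageHeader.size)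
    (_h_GifFreeMapObject : ∀ (H : Heap) (rest : List Obj) (frames : List (Nat × FrameLayout)) (colors n : Nat), Calls Lay μ ProgX.Base.WayInv (ProgX.Base.conv u₀) Gif.L.GifFreeMapObject.entry (Gif.Spec.GifFreeMapObject.spec H rest frames colors n))
    (_h_GifMakeMapObject : ∀ (H : Heap) (rest : List Obj) (frames : List (Nat × FrameLayout)) (count : Nat), Calls Lay μ ProgX.Base.WayInv (ProgX.Base.conv u₀) Gif.L.GifMakeMapObject.entry (Gif.Spec.GifMakeMapObject.spec H rest frames count))
    (_h_asan_store1_noabort : Asan.SmallCheck Lay μ ProgX.Base.WayInv (ProgX.Base.CodeOK u₀) [.rax, .rdx] 1 ProgX.Base.L.__asan_store1_noabort.entry)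
    (_h_asan_load8_noabort : Asan.SmallCheck Lay μ ProgX.Base.WayInv (ProgX.Base.CodeOK u₀) [.rax, .rcx, .rdx] 8 ProgX.Base.L.__asan_load8_noabort.entry)
    (_h_asan_store8_noabort : Asan.SmallCheck Lay μ ProgX.Base.WayInv (ProgX.Base.CodeOK u₀) [.rax, .rcx, .rdx] 8 ProgX.Base.L.__asan_store8_noabort.entry)
    (_h_asan_store4_noabort : Asan.SmallCheck Lay μ ProgX.Base.WayInv (ProgX.Base.CodeOK u₀) [.rax, .rcx, .rdx] 4 ProgX.Base.L.__asan_store4_noabort.entry),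
    Gif.Spec.DGifGetImageHeader.Seg3 Lay μ u₀

end Gif.Spec.DGifGetImageHeader_3
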